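-- pv_equiv track=rewrite | github.com/nikshostudios/beroz | backend/scripts/refresh_foundit_cookie.py | build_cookie_header
-- ===== SOURCE A (Python) =====
-- REQUIRED_COOKIES = ["C", "csrftoken", "django_language"]
--
-- def build_cookie_header(cookies: dict[str, str]) -> str:
--     """Build the full Cookie header string from individual cookies."""
--     # Put the important session cookies first, then everything else
--     ordered = []
--     for key in REQUIRED_COOKIES:
--         if key in cookies:
--             ordered.append(f"{key}={cookies[key]}")
--
--     for key, val in cookies.items():
--         if key not in REQUIRED_COOKIES:
--             ordered.append(f"{key}={val}")
--
--     return "; ".join(ordered)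
-- ===== SOURCE B (Python) =====
-- REQUIRED_COOKIES = ["C", "csrftoken", "django_language"]
--
-- def build_cookie_header(cookies: dict[str, str]) -> str:
--     """Build the full Cookie header string from individual cookies."""
--     # One stable sort: required cookies first (in REQUIRED_COOKIES order),
--     # everything else after, in dict-insertion order.
--     idx = {k: i for i, k in enumerate(REQUIRED_COOKIES)}
--     items = sorted(cookies.items(), key=lambda kv: idx.get(kv[0], len(REQUIRED_COOKIES)))
--     return "; ".join(f"{k}={v}" for k, v in items)
-- ===== Notes on version B (the rewrite author's own statement) =====
-- stated objective: idiomatic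
-- what changed: Replaces A's two append-loops (scan REQUIRED_COOKIES with dict lookups, then scan the dict skipping required keys) by one stable sort of cookies.items() keyed by the required-cookie index (a prebuilt index dict, sentinel len(REQUIRED_COOKIES) for the rest) followed by a single join.
import Mathlib
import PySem

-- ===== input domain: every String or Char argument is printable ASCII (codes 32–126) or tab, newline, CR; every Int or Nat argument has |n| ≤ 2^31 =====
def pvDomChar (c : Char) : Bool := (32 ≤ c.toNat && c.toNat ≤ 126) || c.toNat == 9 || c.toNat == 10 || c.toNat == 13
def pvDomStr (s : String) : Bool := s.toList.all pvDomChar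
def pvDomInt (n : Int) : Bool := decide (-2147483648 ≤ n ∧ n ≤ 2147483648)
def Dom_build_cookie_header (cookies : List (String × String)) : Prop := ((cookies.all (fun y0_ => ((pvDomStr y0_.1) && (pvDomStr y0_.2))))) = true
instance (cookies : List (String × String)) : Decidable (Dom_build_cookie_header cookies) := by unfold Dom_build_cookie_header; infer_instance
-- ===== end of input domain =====

-- B replaces A's two append-loops by one stable sort keyed by required-cookie index, then a single join.


def REQUIRED_COOKIES : List String := ["C", "csrftoken", "django_language"]

-- ===== PORT A =====
def build_cookie_header (cookies : List (String × String)) : String :=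
  let d := PySem.Dict.mk cookies
  let ordered : List String := REQUIRED_COOKIES.foldl (fun acc key =>
    match d.get? key with          -- 'if key in cookies: ordered.append(f"{key}={cookies[key]}")'
    | some v => acc ++ [key ++ "=" ++ v]
    | none => acc) []
  let ordered2 : List String := cookies.foldl (fun acc kv =>
    if kv.1 ∈ REQUIRED_COOKIES then acc else acc ++ [kv.1 ++ "=" ++ kv.2]) ordered
  PySem.Str.join "; " ordered2

-- ===== PORT B =====
def build_cookie_header_alt (cookies : List (String × String)) : String :=
  let idx : PySem.Dict String Int :=
    (PySem.List.enumerate REQUIRED_COOKIES 0).foldl (fun d p => d.insert p.2 p.1) PySem.Dict.empty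
  let items := PySem.List.sorted cookies (fun kv => idx.getD kv.1 (REQUIRED_COOKIES.length : Int))
  PySem.Str.join "; " (items.map (fun kv => kv.1 ++ "=" ++ kv.2))

-- ===== PRECONDITION & SPEC =====
-- Pre_ restricts the association list to pairwise-distinct keys: A's argument is a Python dict, which can
-- never hold a duplicate key, so no input A accepts is excluded.
def Pre_build_cookie_header (cookies : List (String × String)) : Prop := (cookies.map Prod.fst).Nodup
instance (cookies : List (String × String)) : Decidable (Pre_build_cookie_header cookies) := by unfold Pre_build_cookie_header; infer_instance
def pvWitness_build_cookie_header : (List (String × String)) := [("csrftoken", "t0k"), ("foo", "1"), ("C", "sess")]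
def Spec_build_cookie_header (cookies : List (String × String)) (out : String) : Prop := out = build_cookie_header_alt cookies
instance (cookies : List (String × String)) (out : String) : Decidable (Spec_build_cookie_header cookies out) := by unfold Spec_build_cookie_header; infer_instance

-- ===== CLAIM (what is proved, stated in full; the proofs are below) =====
def Claim_equal_build_cookie_header : Prop := ∀ (cookies : List (String × String)), Dom_build_cookie_header cookies → Pre_build_cookie_header cookies → Spec_build_cookie_header cookies (build_cookie_header cookies)

-- ===== LEMMAS AND PROOFS =====

-- B's sort key, in closed form: position in REQUIRED_COOKIES, else 3
def pvKey (kv : String × String) : Int :=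
  if kv.1 = "C" then 0 else if kv.1 = "csrftoken" then 1 else if kv.1 = "django_language" then 2 else 3

lemma pvKey_spec (kv : String × String) :
    ((PySem.List.enumerate REQUIRED_COOKIES 0).foldl (fun d p => d.insert p.2 p.1) PySem.Dict.empty).getD kv.1 (REQUIRED_COOKIES.length : Int)
      = pvKey kv := by
  have h : ((PySem.List.enumerate REQUIRED_COOKIES 0).foldl (fun d p => d.insert p.2 p.1) (PySem.Dict.empty (κ := String) (ν := Int)))
      = PySem.Dict.mk [("C", 0), ("csrftoken", 1), ("django_language", 2)] := by decide
  rw [h]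
  by_cases h1 : kv.1 = "C"
  · simp [PySem.Dict.getD_eq_get?_getD, PySem.Dict.get?_mk_cons, pvKey, h1]
  by_cases h2 : kv.1 = "csrftoken"
  · simp [PySem.Dict.getD_eq_get?_getD, PySem.Dict.get?_mk_cons, pvKey, h2]
  by_cases h3 : kv.1 = "django_language"
  · simp [PySem.Dict.getD_eq_get?_getD, PySem.Dict.get?_mk_cons, pvKey, h3]
  · simp [PySem.Dict.getD_eq_get?_getD, PySem.Dict.get?_mk_cons, pvKey, h1, h2, h3,
      REQUIRED_COOKIES, Ne.symm h1, Ne.symm h2, Ne.symm h3]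
    rfl

lemma pvKey_cases (kv : String × String) : pvKey kv = 0 ∨ pvKey kv = 1 ∨ pvKey kv = 2 ∨ pvKey kv = 3 := by
  unfold pvKey; split_ifs <;> simp

lemma insertBy_middle {α : Type} (before : α → α → Bool) (x : α) (A B : List α)
    (hA : ∀ a ∈ A, before x a = false) (hB : ∀ b ∈ B, before x b = true) :
    PySem.List.insertBy before x (A ++ B) = A ++ x :: B := by
  induction A with
  | nil =>
    cases B with
    | nil => simp [PySem.List.insertBy]
    | cons b B' => simp [PySem.List.insertBy, hB b (by simp)]
  | cons a A' ih =>
    simp only [List.cons_append, PySem.List.insertBy, hA a (by simp)]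
    simp only [Bool.false_eq_true, if_false, List.cons.injEq, true_and]
    exact ih (fun a ha => hA a (by simp [ha]))

-- the stable sort by pvKey groups the list: key-0 elements first, then key-1, key-2, key-3, each group in input order
lemma sorted_grouped (xs : List (String × String)) :
    PySem.List.sorted xs pvKey =
      (xs.filter fun kv => pvKey kv == 0) ++ (xs.filter fun kv => pvKey kv == 1) ++
      (xs.filter fun kv => pvKey kv == 2) ++ (xs.filter fun kv => pvKey kv == 3) := by
  induction xs using List.reverseRecOn with
  | nil => rfl
  | append_singleton xs x ih =>
    have e : PySem.List.sorted (xs ++ [x]) pvKey =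
        PySem.List.insertBy (fun a b => decide (pvKey a < pvKey b)) x (PySem.List.sorted xs pvKey) := by
      rw [PySem.List.sorted_eq_foldl_insertBy, PySem.List.sorted_eq_foldl_insertBy, List.foldl_append]
      rfl
    rw [e, ih]
    simp only [List.filter_append, List.append_assoc]
    rcases pvKey_cases x with h | h | h | h
    · rw [insertBy_middle _ x (xs.filter fun kv => pvKey kv == 0)
        ((xs.filter fun kv => pvKey kv == 1) ++ ((xs.filter fun kv => pvKey kv == 2) ++ (xs.filter fun kv => pvKey kv == 3)))
        (by intro a ha; simp only [List.mem_filter, beq_iff_eq] at ha; simp [h, ha.2])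
        (by intro b hb; simp only [List.mem_append, List.mem_filter, beq_iff_eq] at hb
            rcases hb with h1 | h1 | h1 <;> simp [h, h1.2])]
      simp [h]
    · rw [show (xs.filter fun kv => pvKey kv == 0) ++ ((xs.filter fun kv => pvKey kv == 1) ++ ((xs.filter fun kv => pvKey kv == 2) ++ (xs.filter fun kv => pvKey kv == 3)))
          = ((xs.filter fun kv => pvKey kv == 0) ++ (xs.filter fun kv => pvKey kv == 1)) ++ ((xs.filter fun kv => pvKey kv == 2) ++ (xs.filter fun kv => pvKey kv == 3)) by simp [List.append_assoc]]
      rw [insertBy_middle _ x _ _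
        (by intro a ha; simp only [List.mem_append, List.mem_filter, beq_iff_eq] at ha
            rcases ha with h1 | h1 <;> simp [h, h1.2])
        (by intro b hb; simp only [List.mem_append, List.mem_filter, beq_iff_eq] at hb
            rcases hb with h1 | h1 <;> simp [h, h1.2])]
      simp [h]
    · rw [show (xs.filter fun kv => pvKey kv == 0) ++ ((xs.filter fun kv => pvKey kv == 1) ++ ((xs.filter fun kv => pvKey kv == 2) ++ (xs.filter fun kv => pvKey kv == 3)))
          = (((xs.filter fun kv => pvKey kv == 0) ++ (xs.filter fun kv => pvKey kv == 1)) ++ (xs.filter fun kv => pvKey kv == 2)) ++ (xs.filter fun kv => pvKey kv == 3) by simp [List.append_assoc]]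
      rw [insertBy_middle _ x _ _
        (by intro a ha; simp only [List.mem_append, List.mem_filter, beq_iff_eq] at ha
            rcases ha with (h1 | h1) | h1 <;> simp [h, h1.2])
        (by intro b hb; simp only [List.mem_filter, beq_iff_eq] at hb
            simp [h, hb.2])]
      simp [h]
    · rw [PySem.List.insertBy_of_forall_not_before _ _ _
        (by intro a ha; simp only [List.mem_append, List.mem_filter, beq_iff_eq] at ha
            rcases ha with h1 | h1 | h1 | h1 <;> simp [h, h1.2])]
      simp [h]

lemma filter_key_eq (l : List (String × String)) (hnd : (l.map Prod.fst).Nodup) (k : String) :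
    l.filter (fun kv => kv.1 == k) =
      (match (PySem.Dict.mk l).get? k with
       | some v => [(k, v)]
       | none => ([] : List (String × String))) := by
  induction l with
  | nil => rfl
  | cons p rest ih =>
    obtain ⟨k0, v0⟩ := p
    simp only [List.map_cons, List.nodup_cons] at hnd
    rw [PySem.Dict.get?_mk_cons]
    by_cases hk : k0 = k
    · subst hk
      have hrest : rest.filter (fun kv => kv.1 == k0) = [] := by
        rw [List.filter_eq_nil_iff]
        intro kv hkv
        simp only [beq_iff_eq]
        intro hc
        exact hnd.1 (by simpa [hc] using List.mem_map_of_mem (f := Prod.fst) hkv)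
      simp [hrest]
    · simp only [List.filter_cons]
      have : ((k0, v0).1 == k) = false := by simpa using hk
      simp only [this, Bool.false_eq_true, if_false]
      exact ih hnd.2

-- A's first loop: the required cookies present, formatted, in REQUIRED_COOKIES order
lemma loop1_eq (cookies : List (String × String)) (hpre : (cookies.map Prod.fst).Nodup) :
    List.foldl (fun acc key =>
      match (PySem.Dict.mk cookies).get? key with
      | some v => acc ++ [key ++ "=" ++ v]
      | none => acc) [] REQUIRED_COOKIES
    = ((cookies.filter fun kv => kv.1 == "C").map (fun kv => kv.1 ++ "=" ++ kv.2))
      ++ ((cookies.filter fun kv => kv.1 == "csrftoken").map (fun kv => kv.1 ++ "=" ++ kv.2))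
      ++ ((cookies.filter fun kv => kv.1 == "django_language").map (fun kv => kv.1 ++ "=" ++ kv.2)) := by
  simp only [REQUIRED_COOKIES, List.foldl_cons, List.foldl_nil]
  rw [filter_key_eq cookies hpre "C", filter_key_eq cookies hpre "csrftoken",
      filter_key_eq cookies hpre "django_language"]
  rcases hC : (PySem.Dict.mk cookies).get? "C" with _ | v0 <;>
    rcases hT : (PySem.Dict.mk cookies).get? "csrftoken" with _ | v1 <;>
      rcases hD : (PySem.Dict.mk cookies).get? "django_language" with _ | v2 <;>
        simp [hC, hT, hD]

-- A's second loop: appends exactly the non-required cookies, in input order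
lemma loop2_eq (l : List (String × String)) (acc : List String) :
    List.foldl (fun acc kv =>
      if kv.1 ∈ REQUIRED_COOKIES then acc else acc ++ [kv.1 ++ "=" ++ kv.2]) acc l
    = acc ++ (l.filter fun kv => pvKey kv == 3).map (fun kv => kv.1 ++ "=" ++ kv.2) := by
  induction l generalizing acc with
  | nil => simp
  | cons x t ih =>
    simp only [List.foldl_cons, List.filter_cons]
    by_cases h : x.1 ∈ REQUIRED_COOKIES
    · have hx : (pvKey x == 3) = false := by
        simp only [REQUIRED_COOKIES, List.mem_cons, List.not_mem_nil, or_false] at h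
        rcases h with h | h | h <;> simp [pvKey, h]
      simp [h, hx, ih]
    · have hx : (pvKey x == 3) = true := by
        simp only [REQUIRED_COOKIES, List.mem_cons, List.not_mem_nil, or_false, not_or] at h
        simp [pvKey, h.1, h.2.1, h.2.2]
      simp [h, hx, ih, List.append_assoc]

-- ===== VERDICT (by name: the statement is the Claim_ definition above) =====
theorem build_cookie_header_spec : Claim_equal_build_cookie_header := by
  intro cookies _ hpre
  unfold Spec_build_cookie_header Pre_build_cookie_header at *
  simp only [build_cookie_header, build_cookie_header_alt, pvKey_spec]
  rw [sorted_grouped]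
  refine congrArg (PySem.Str.join "; ") ?_
  refine Eq.trans (loop2_eq cookies _) ?_
  refine Eq.trans (congrArg
    (fun z => z ++ (cookies.filter fun kv => pvKey kv == 3).map (fun kv => kv.1 ++ "=" ++ kv.2))
    (loop1_eq cookies hpre)) ?_
  have e0 : cookies.filter (fun kv => kv.1 == "C") = cookies.filter (fun kv => pvKey kv == 0) := by
    apply List.filter_congr; intro kv _
    unfold pvKey; split_ifs with h1 h2 h3 <;> simp_all
  have e1 : cookies.filter (fun kv => kv.1 == "csrftoken") = cookies.filter (fun kv => pvKey kv == 1) := by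
    apply List.filter_congr; intro kv _
    unfold pvKey; split_ifs with h1 h2 h3 <;> simp_all
  have e2 : cookies.filter (fun kv => kv.1 == "django_language") = cookies.filter (fun kv => pvKey kv == 2) := by
    apply List.filter_congr; intro kv _
    unfold pvKey; split_ifs with h1 h2 h3 <;> simp_all
  rw [e0, e1, e2]
  simp [List.map_append, List.append_assoc]
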